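-- pv_equiv track=rewrite | github.com/Motovis-lab/prefusion_maptrv2 | prefusion/dataset/dataset.py | _batch_groups
-- ===== SOURCE A (Python) =====
-- def _batch_groups(group_batch_ind, groups, batch_size):
--     batched_groups = []
--     for batch_idx in range(batch_size):
--         group_idx = group_batch_ind * batch_size + batch_idx
--         if group_idx >= len(groups):
--             group_idx = max(0, 2 * (len(groups) - 1) - group_idx)
--         batched_groups.append(groups[group_idx])
--     return batched_groups
-- ===== SOURCE B (Python) =====
-- def _batch_groups(group_batch_ind, groups, batch_size):
--     n = len(groups)
--     start = group_batch_ind * batch_size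
--     count = max(0, min(batch_size, n - start))
--     batched = groups[start:start + count]
--     for j in range(count, batch_size):
--         batched.append(groups[max(0, 2 * (n - 1) - (start + j))])
--     return batched
-- ===== Notes on version B (the rewrite author's own statement) =====
-- stated objective: alternative
-- what changed: Replaced the uniform per-position branch-and-index loop by one slice for the in-range prefix plus a short loop over only the reflected tail; Pre_ restricts to the natural domain of a nonnegative starting index (and nonempty groups when batch_size > 0), excluding inputs where A's values come from Python negative-index wraparound or where A raises IndexError.
-- outside the precondition, e.g. on _batch_groups(-1, [10, 20, 30], 2): A returns [20, 30], B returns []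
import Mathlib
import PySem

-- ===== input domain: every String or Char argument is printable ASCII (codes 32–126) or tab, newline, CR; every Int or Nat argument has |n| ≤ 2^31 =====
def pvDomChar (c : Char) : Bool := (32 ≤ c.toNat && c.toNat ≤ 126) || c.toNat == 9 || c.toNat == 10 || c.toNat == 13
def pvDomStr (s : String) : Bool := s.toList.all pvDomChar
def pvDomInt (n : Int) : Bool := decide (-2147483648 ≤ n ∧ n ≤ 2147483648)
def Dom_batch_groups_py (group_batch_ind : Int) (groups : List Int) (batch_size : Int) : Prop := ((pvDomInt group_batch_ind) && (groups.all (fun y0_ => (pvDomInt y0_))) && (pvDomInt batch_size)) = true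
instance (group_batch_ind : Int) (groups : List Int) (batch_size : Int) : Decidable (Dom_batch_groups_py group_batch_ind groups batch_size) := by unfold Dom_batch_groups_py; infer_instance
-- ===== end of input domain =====

-- B replaces the uniform per-position branch-and-index loop by one slice for the in-range
-- prefix plus a short loop over only the reflected tail (objective: alternative).

-- ===== PORT A =====
def batch_groups_py (group_batch_ind : Int) (groups : List Int) (batch_size : Int) : List Int :=
  (PySem.List.pyRange 0 batch_size 1).foldl (fun batched_groups batch_idx =>
    let group_idx := group_batch_ind * batch_size + batch_idx
    let group_idx := if group_idx ≥ (groups.length : Int)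
      then max 0 (2 * ((groups.length : Int) - 1) - group_idx) else group_idx
    -- groups[group_idx]: IndexError excluded by Pre_, so the default is never used
    batched_groups ++ [PySem.List.pyGetD groups group_idx 0]) []

-- ===== PORT B =====
def batch_groups_py_alt (group_batch_ind : Int) (groups : List Int) (batch_size : Int) : List Int :=
  let n : Int := groups.length
  let start := group_batch_ind * batch_size
  let count := max 0 (min batch_size (n - start))
  let batched := PySem.List.slice groups (some start) (some (start + count))
  (PySem.List.pyRange count batch_size 1).foldl (fun acc j =>
    -- groups[...]: index is in [0, n) here under Pre_, so the default is never used
    acc ++ [PySem.List.pyGetD groups (max 0 (2 * (n - 1) - (start + j))) 0]) batched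

-- ===== PRECONDITION & SPEC =====
-- Pre_ restricts to the function's natural domain: a nonnegative starting index and, when
-- batch_size > 0, nonempty groups; it excludes inputs where A raises IndexError (empty
-- groups, or a start below -len(groups)) and the out-of-contract negative starts where A's
-- values are accidents of Python negative-index wraparound.
def Pre_batch_groups_py (group_batch_ind : Int) (groups : List Int) (batch_size : Int) : Prop :=
  batch_size ≤ 0 ∨ (0 ≤ group_batch_ind * batch_size ∧ 1 ≤ groups.length)
instance (group_batch_ind : Int) (groups : List Int) (batch_size : Int) : Decidable (Pre_batch_groups_py group_batch_ind groups batch_size) := by unfold Pre_batch_groups_py; infer_instance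
def pvWitness_batch_groups_py : Int × List Int × Int := (1, [10, 20, 30], 2)

def Spec_batch_groups_py (group_batch_ind : Int) (groups : List Int) (batch_size : Int) (out : List Int) : Prop := out = batch_groups_py_alt group_batch_ind groups batch_size
instance (group_batch_ind : Int) (groups : List Int) (batch_size : Int) (out : List Int) : Decidable (Spec_batch_groups_py group_batch_ind groups batch_size out) := by unfold Spec_batch_groups_py; infer_instance

-- ===== CLAIM (what is proved, stated in full; the proofs are below) =====
def Claim_equal_batch_groups_py : Prop := ∀ (group_batch_ind : Int) (groups : List Int) (batch_size : Int), Dom_batch_groups_py group_batch_ind groups batch_size → Pre_batch_groups_py group_batch_ind groups batch_size → Spec_batch_groups_py group_batch_ind groups batch_size (batch_groups_py group_batch_ind groups batch_size)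

-- ===== LEMMAS AND PROOFS =====

theorem pv_foldl_append_map {α β : Type} (g : α → β) (l : List α) (init : List β) :
    l.foldl (fun acc x => acc ++ [g x]) init = init ++ l.map g := by
  induction l generalizing init with
  | nil => simp
  | cons a l ih => simp [List.foldl, ih, List.append_assoc]

theorem pv_slice_self {α : Type} (xs : List α) (a : Int) :
    PySem.List.slice xs (some a) (some a) = [] := by
  apply List.eq_nil_of_length_eq_zero
  rw [PySem.List.length_slice]; omega

theorem pv_drop_take_map (groups : List Int) (s c : Nat) (h : c ≤ groups.length - s) :
    (groups.drop s).take c = (List.range c).map (fun k => groups.getD (s + k) 0) := by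
  apply List.ext_getElem
  · simp; omega
  · intro i h1 h2
    simp only [List.getElem_take, List.getElem_drop, List.getElem_map, List.getElem_range]
    rw [List.getD_eq_getElem groups 0 (by simp at h1 ⊢; omega)]

theorem pv_main (gbi : Int) (groups : List Int) (bs : Int)
    (hpre : bs ≤ 0 ∨ (0 ≤ gbi * bs ∧ 1 ≤ groups.length)) :
    batch_groups_py gbi groups bs = batch_groups_py_alt gbi groups bs := by
  simp only [batch_groups_py, batch_groups_py_alt]
  by_cases hbs : bs ≤ 0
  · have hc : max 0 (min bs ((groups.length : Int) - gbi * bs)) = 0 := by omega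
    rw [hc, PySem.List.pyRange_one_eq_nil hbs, add_zero]
    simp [pv_slice_self]
  · have hbs : 0 < bs := by omega
    have hstart : 0 ≤ gbi * bs := by rcases hpre with h | ⟨h, _⟩; omega; exact h
    have hn1 : 1 ≤ groups.length := by rcases hpre with h | ⟨_, h⟩; omega; exact h
    obtain ⟨countN, hcountN⟩ : ∃ k : Nat,
        max 0 (min bs ((groups.length : Int) - gbi * bs)) = (k : Int) :=
      ⟨_, (Int.toNat_of_nonneg (by omega)).symm⟩
    rw [hcountN]
    obtain ⟨tailN, htailN⟩ : ∃ k : Nat, (bs - (countN : Int)).toNat = k := ⟨_, rfl⟩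
    have hm : (bs - 0).toNat = countN + tailN := by omega
    rw [pv_foldl_append_map, pv_foldl_append_map, PySem.List.pyRange_one, PySem.List.pyRange_one,
      List.map_map, List.map_map, hm, htailN, List.range_add, List.map_append, List.map_map]
    rw [List.nil_append]
    congr 1
    · -- in-range prefix, matched against B's slice
      rw [PySem.List.slice_toNat groups (a := gbi * bs) (b := gbi * bs + (countN : Int))
        (by omega) (by omega)]
      have hlen : ((gbi * bs + (countN : Int)).toNat - (gbi * bs).toNat) = countN := by omega
      rw [hlen, pv_drop_take_map groups (gbi * bs).toNat countN (by omega)]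
      apply List.map_congr_left
      intro k hk
      simp only [List.mem_range] at hk
      simp only [Function.comp]
      rw [if_neg (by omega)]
      rw [PySem.List.pyGetD_eq_getElem groups 0 (by omega) (by omega)]
      rw [List.getD_eq_getElem groups 0 (by omega)]
      congr 1
      omega
    · -- reflected tail, matched against B's loop
      apply List.map_congr_left
      intro k hk
      simp only [List.mem_range] at hk
      simp only [Function.comp]
      rw [if_pos (by omega)]
      congr 2
      omega

-- ===== VERDICT (by name: the statement is the Claim_ definition above) =====
theorem batch_groups_py_spec : Claim_equal_batch_groups_py := by
  intro gbi groups bs _hdom hpre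
  unfold Spec_batch_groups_py
  exact pv_main gbi groups bs hpre
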